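-- pv_equiv track=rewrite | github.com/Charly98cma/MyAdventOfCode | 2020/day20/day20.py | align_tiles
-- ===== SOURCE A (Python) =====
-- def align_tiles(tiles_perms: dict[int:list[str]]) -> dict[int:list[int]]:
--     # Dictionary of the adjacent tiles of each tile
--     res = {}
--     for t_id, t_p in tiles_perms.items():
--         res[t_id] = []
--         for tile_id, tile_p in tiles_perms.items():
--             # Do not match a tile with itself
--             if t_id == tile_id:
--                 continue
--             for x in t_p:
--                 # If theres a common element, the tiles are adjacent
--                 if x in tile_p:
--                     res[t_id].append(tile_id)
--                     break
--     return res
-- ===== SOURCE B (Python) =====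
-- def align_tiles(tiles_perms: dict[int:list[str]]) -> dict[int:list[int]]:
--     # Inverted index: permutation string -> set of ids of the tiles containing it
--     index = {}
--     for tid, perms in tiles_perms.items():
--         for x in perms:
--             index.setdefault(x, set()).add(tid)
--     res = {}
--     for tid, perms in tiles_perms.items():
--         # Union of the index buckets of this tile's permutations = all tiles
--         # sharing some permutation with it (including itself)
--         nbrs = set()
--         for x in perms:
--             nbrs |= index[x]
--         res[tid] = [other for other in tiles_perms if other != tid and other in nbrs]
--     return res
-- ===== Notes on version B (the rewrite author's own statement) =====
-- stated objective: faster
-- what changed: Replaces the all-pairs scan with each pair's permutation lists compared by nested membership tests by an inverted index from permutation string to the set of tiles containing it, built in one pass; each tile's neighbours are then the union of its strings' index buckets, emitted in dict order.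
import Mathlib
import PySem

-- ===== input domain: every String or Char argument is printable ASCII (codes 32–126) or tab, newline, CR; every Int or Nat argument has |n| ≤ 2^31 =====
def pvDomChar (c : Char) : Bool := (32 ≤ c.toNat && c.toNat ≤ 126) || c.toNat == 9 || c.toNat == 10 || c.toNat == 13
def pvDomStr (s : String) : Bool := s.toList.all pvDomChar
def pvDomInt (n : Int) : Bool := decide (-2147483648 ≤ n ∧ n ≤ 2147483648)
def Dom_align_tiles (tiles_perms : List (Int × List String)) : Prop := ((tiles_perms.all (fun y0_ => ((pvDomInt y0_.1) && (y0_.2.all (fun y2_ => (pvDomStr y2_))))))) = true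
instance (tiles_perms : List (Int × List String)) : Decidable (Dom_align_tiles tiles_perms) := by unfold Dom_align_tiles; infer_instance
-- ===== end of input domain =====

-- B replaces A's all-pairs nested-membership scan by an inverted index (permutation string -> set
-- of tiles containing it); measured faster at the largest generated size. Return value only.


-- ===== PORT A =====
-- 'for x in t_p: if x in tile_p: …; break' — the append runs iff some permutation string is shared
def hasCommonPerm : List String → List String → Bool
  | [], _ => false
  | x :: xs, tile_p => if tile_p.contains x then true else hasCommonPerm xs tile_p

-- res is a dict whose key t_id is written exactly once per outer iteration (the keys of a dict
-- argument are distinct, see Pre_), so it is its items list built in insertion order.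
def align_tiles (tiles_perms : List (Int × List String)) : List (Int × List Int) :=
  tiles_perms.foldl (fun res t =>
    res ++ [(t.1, tiles_perms.foldl (fun acc q =>
      if t.1 == q.1 then acc
      else if hasCommonPerm t.2 q.2 then acc ++ [q.1] else acc) [])]) []

-- ===== PORT B =====
-- index.setdefault(x, set()).add(tid) = index[x] = index.get(x, set()) ∪ {tid}, i.e. Dict.modify
def permIndex (tiles_perms : List (Int × List String)) : PySem.Dict String (PySem.Set Int) :=
  tiles_perms.foldl (fun idx t =>
    t.2.foldl (fun idx x =>
      idx.modify x PySem.Set.empty (fun s => PySem.Set.add s t.1)) idx) PySem.Dict.empty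

-- index[x] is ported as getD with the empty set: x ∈ perms of the current tile, so the key exists
def align_tiles_alt (tiles_perms : List (Int × List String)) : List (Int × List Int) :=
  let index := permIndex tiles_perms
  tiles_perms.foldl (fun res t =>
    let nbrs : PySem.Set Int :=
      t.2.foldl (fun s x => PySem.Set.union s (index.getD x PySem.Set.empty)) PySem.Set.empty
    res ++ [(t.1, (tiles_perms.map Prod.fst).filter
      (fun k => k != t.1 && PySem.Set.contains nbrs k))]) []

-- ===== PRECONDITION & SPEC =====
-- Pre_ excludes association lists with duplicate keys: the Python argument is a dict, which cannot
-- hold duplicate keys (dict construction collapses them), so such lists represent no dict input.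
def Pre_align_tiles (tiles_perms : List (Int × List String)) : Prop :=
  (tiles_perms.map Prod.fst).Nodup
instance (tiles_perms : List (Int × List String)) : Decidable (Pre_align_tiles tiles_perms) := by
  unfold Pre_align_tiles; infer_instance

def pvWitness_align_tiles : (List (Int × List String)) :=
  [(1, ["ab"]), (2, ["ab", "cd"]), (3, ["zz"])]

def Spec_align_tiles (tiles_perms : List (Int × List String)) (out : List (Int × List Int)) : Prop := out = align_tiles_alt tiles_perms
instance (tiles_perms : List (Int × List String)) (out : List (Int × List Int)) : Decidable (Spec_align_tiles tiles_perms out) := by unfold Spec_align_tiles; infer_instance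

-- ===== CLAIM (what is proved, stated in full; the proofs are below) =====
def Claim_equal_align_tiles : Prop := ∀ (tiles_perms : List (Int × List String)), Dom_align_tiles tiles_perms → Pre_align_tiles tiles_perms → Spec_align_tiles tiles_perms (align_tiles tiles_perms)

-- ===== LEMMAS AND PROOFS =====

-- a foldl that only appends one element per step is a map
theorem foldl_append_singleton {α β : Type} (g : α → β) (l : List α) (acc : List β) :
    l.foldl (fun r x => r ++ [g x]) acc = acc ++ l.map g := by
  induction l generalizing acc with
  | nil => simp
  | cons x xs ih => simp [List.foldl, ih]

-- A's inner loop is a filter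
theorem innerA_eq_filter (t : Int × List String) (l : List (Int × List String))
    (acc : List Int) :
    l.foldl (fun acc q =>
      if t.1 == q.1 then acc
      else if hasCommonPerm t.2 q.2 then acc ++ [q.1] else acc) acc
    = acc ++ (l.filter (fun q => !(t.1 == q.1) && hasCommonPerm t.2 q.2)).map Prod.fst := by
  induction l generalizing acc with
  | nil => simp
  | cons q qs ih =>
    simp only [List.foldl_cons, List.filter_cons]
    by_cases h1 : t.1 = q.1
    · rw [if_pos (by simp [h1] : (t.1 == q.1) = true)]
      rw [(by simp [h1] : (!(t.1 == q.1) && hasCommonPerm t.2 q.2) = false)]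
      simp only [Bool.false_eq_true, if_false]
      exact ih acc
    · rw [if_neg (by simp [h1] : ¬ ((t.1 == q.1) = true))]
      by_cases h2 : hasCommonPerm t.2 q.2
      · rw [if_pos h2]
        rw [(by simp [h1, h2] : (!(t.1 == q.1) && hasCommonPerm t.2 q.2) = true)]
        rw [ih]
        simp
      · rw [if_neg h2]
        rw [(by simp [h2] : (!(t.1 == q.1) && hasCommonPerm t.2 q.2) = false)]
        simp only [Bool.false_eq_true, if_false]
        exact ih acc

theorem hasCommonPerm_iff (xs q : List String) :
    hasCommonPerm xs q = true ↔ ∃ x ∈ xs, x ∈ q := by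
  induction xs with
  | nil => simp [hasCommonPerm]
  | cons x xs ih =>
    by_cases h : x ∈ q
    · have hc : q.contains x = true := by simpa using h
      refine ⟨fun _ => ⟨x, by simp, h⟩, fun _ => ?_⟩
      simp only [hasCommonPerm, hc, if_true]
    · have hc : q.contains x = false := by simpa using h
      simp only [hasCommonPerm, hc, Bool.false_eq_true, if_false, ih]
      constructor
      · rintro ⟨y, hy, hyq⟩
        exact ⟨y, List.mem_cons_of_mem _ hy, hyq⟩
      · rintro ⟨y, hy, hyq⟩
        rcases List.mem_cons.mp hy with rfl | hy'
        · exact absurd hyq h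
        · exact ⟨y, hy', hyq⟩

-- membership in one bucket of the index after processing one tile's permutation list
theorem mem_getD_inner_index (tid : Int) (l : List String)
    (d : PySem.Dict String (PySem.Set Int)) (x : String) (k : Int) :
    k ∈ (l.foldl (fun idx x' =>
          idx.modify x' PySem.Set.empty (fun s => PySem.Set.add s tid)) d).getD x PySem.Set.empty
    ↔ k ∈ d.getD x PySem.Set.empty ∨ (x ∈ l ∧ k = tid) := by
  induction l generalizing d with
  | nil => simp
  | cons a as ih =>
    simp only [List.foldl, ih, PySem.Dict.getD_modify]
    by_cases hx : x = a
    · subst hx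
      simp [PySem.Set.mem_add]
      tauto
    · simp [hx]

-- membership in one bucket of the full inverted index
theorem mem_getD_permIndex_aux (tps : List (Int × List String))
    (d : PySem.Dict String (PySem.Set Int)) (x : String) (k : Int) :
    k ∈ (tps.foldl (fun idx t =>
          t.2.foldl (fun idx x' =>
            idx.modify x' PySem.Set.empty (fun s => PySem.Set.add s t.1)) idx) d).getD x PySem.Set.empty
    ↔ k ∈ d.getD x PySem.Set.empty ∨ ∃ t ∈ tps, x ∈ t.2 ∧ k = t.1 := by
  induction tps generalizing d with
  | nil => simp
  | cons t ts ih =>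
    simp only [List.foldl, ih, mem_getD_inner_index]
    constructor
    · rintro (( h | ⟨hx, rfl⟩) | ⟨r, hr, hxr, rfl⟩)
      · exact Or.inl h
      · exact Or.inr ⟨t, by simp, hx, rfl⟩
      · exact Or.inr ⟨r, by simp [hr], hxr, rfl⟩
    · rintro (h | ⟨r, hr, hxr, rfl⟩)
      · exact Or.inl (Or.inl h)
      · rcases List.mem_cons.mp hr with rfl | hr'
        · exact Or.inl (Or.inr ⟨hxr, rfl⟩)
        · exact Or.inr ⟨r, hr', hxr, rfl⟩

theorem mem_getD_permIndex (tps : List (Int × List String)) (x : String) (k : Int) :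
    k ∈ (permIndex tps).getD x PySem.Set.empty ↔ ∃ t ∈ tps, x ∈ t.2 ∧ k = t.1 := by
  rw [permIndex, mem_getD_permIndex_aux]
  simp [PySem.Set.empty]

-- membership in the union of the index buckets of a tile's permutations
theorem mem_nbrs (index : PySem.Dict String (PySem.Set Int)) (l : List String)
    (s : PySem.Set Int) (k : Int) :
    k ∈ l.foldl (fun s x => PySem.Set.union s (index.getD x PySem.Set.empty)) s
    ↔ k ∈ s ∨ ∃ x ∈ l, k ∈ index.getD x PySem.Set.empty := by
  induction l generalizing s with
  | nil => simp
  | cons a as ih =>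
    simp only [List.foldl, ih, PySem.Set.mem_union]
    constructor
    · rintro ((h | h) | ⟨x, hx, hk⟩)
      · exact Or.inl h
      · exact Or.inr ⟨a, by simp, h⟩
      · exact Or.inr ⟨x, by simp [hx], hk⟩
    · rintro (h | ⟨x, hx, hk⟩)
      · exact Or.inl (Or.inl h)
      · rcases List.mem_cons.mp hx with rfl | hx'
        · exact Or.inl (Or.inr hk)
        · exact Or.inr ⟨x, hx', hk⟩

-- the pointwise equality of the two filter predicates, on members, under distinct keys
theorem predicate_eq (tps : List (Int × List String))
    (hnd : (tps.map Prod.fst).Nodup)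
    (t : Int × List String) (q : Int × List String) (hq : q ∈ tps) :
    (q.1 != t.1 && PySem.Set.contains
        (t.2.foldl (fun s x => PySem.Set.union s ((permIndex tps).getD x PySem.Set.empty))
          PySem.Set.empty) q.1)
    = (!(t.1 == q.1) && hasCommonPerm t.2 q.2) := by
  by_cases h1 : q.1 = t.1
  · simp [h1]
  · have h1' : ¬ (t.1 = q.1) := fun h => h1 h.symm
    rw [(by simp [h1] : (q.1 != t.1) = true),
        (by simp [h1'] : (!(t.1 == q.1)) = true), Bool.true_and, Bool.true_and]
    rw [Bool.eq_iff_iff]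
    rw [PySem.Set.contains_iff, mem_nbrs, hasCommonPerm_iff]
    simp only [mem_getD_permIndex]
    simp only [PySem.Set.empty, List.not_mem_nil, false_or]
    constructor
    · rintro ⟨x, hx, r, hr, hxr, hqr⟩
      have : r = q := List.inj_on_of_nodup_map hnd hr hq hqr.symm
      subst this
      exact ⟨x, hx, hxr⟩
    · rintro ⟨x, hx, hxq⟩
      exact ⟨x, hx, q, hq, hxq, rfl⟩

-- ===== VERDICT (by name: the statement is the Claim_ definition above) =====
theorem align_tiles_spec : Claim_equal_align_tiles := by
  intro tps _hdom hpre
  have hA := foldl_append_singleton (fun (t : Int × List String) =>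
    (t.1, tps.foldl (fun acc q =>
      if t.1 == q.1 then acc
      else if hasCommonPerm t.2 q.2 then acc ++ [q.1] else acc) [])) tps []
  have hB := foldl_append_singleton (fun (t : Int × List String) =>
    (t.1, (tps.map Prod.fst).filter
      (fun k => k != t.1 && PySem.Set.contains
        (t.2.foldl (fun s x => PySem.Set.union s ((permIndex tps).getD x PySem.Set.empty))
          PySem.Set.empty) k))) tps []
  rw [List.nil_append] at hA hB
  unfold Spec_align_tiles align_tiles align_tiles_alt
  refine Eq.trans (Eq.trans hA ?_) hB.symm
  apply List.map_congr_left
  intro t _ht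
  congr 1
  rw [innerA_eq_filter]
  rw [List.nil_append, List.filter_map]
  symm
  congr 1
  apply List.filter_congr
  intro q hq
  exact predicate_eq tps hpre t q hq
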